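-- pv_equiv track=rewrite | github.com/KarimElbarbary99/Symbolic-AI-and-Logic-Based-Systems-project- | Solve Nonograms/approach1_rect.py | tseitin_transformation
-- ===== SOURCE A (Python) =====
-- def find_first_helper_variable(dnf_clauses):
--     max_var = 0
--     for clause in dnf_clauses:
--         literals = list(map(int, clause[0].split()))
--         max_var = max(max_var, max(abs(literal) for literal in literals))
--     return max_var + 1
--
-- def tseitin_transformation(dnf_clauses):
--     next_var = find_first_helper_variable(dnf_clauses)
--     helper_vars = []
--     cnf_clauses = []
--
--     prev_literals = set()
--     group_helper_vars = []
--
--     for clause in dnf_clauses: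
--         literals = list(map(int, clause[0].split()))
--         literal_set = set(map(abs, literals))
--
--         if literal_set == prev_literals:
--             helper_var = next_var
--             group_helper_vars.append(helper_var)
--         else:
--             if group_helper_vars:
--                 cnf_clauses.append(group_helper_vars)
--             group_helper_vars = []
--             helper_var = next_var
--             group_helper_vars.append(helper_var)
--
--         # Helper variable implies each literal in the clause
--         for literal in literals:
--             cnf_clauses.append([-helper_var, literal])
--
--         prev_literals = literal_set
--         next_var += 1
--
--     if group_helper_vars:
--         cnf_clauses.append(group_helper_vars)
--
--     return cnf_clauses
-- ===== SOURCE B (Python) =====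
-- def tseitin_transformation(dnf_clauses):
--     # Boundary-index formulation: helper for clause i is base+i in closed form; runs of
--     # equal abs-literal sets are intervals [s, e] obtained by zipping the left boundaries
--     # with the right boundaries, detected by comparing each key with its neighbour.
--     parsed = [[int(t) for t in clause[0].split()] for clause in dnf_clauses]
--     base = 1 + max((abs(l) for lits in parsed for l in lits), default=0)
--     keys = [set(map(abs, lits)) for lits in parsed]
--     n = len(keys)
--     starts = [i for i in range(n) if i == 0 or keys[i] != keys[i - 1]]
--     ends = [i for i in range(n) if i == n - 1 or keys[i] != keys[i + 1]]
--     cnf = []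
--     for s, e in zip(starts, ends):
--         for i in range(s, e + 1):
--             for l in parsed[i]:
--                 cnf.append([-(base + i), l])
--         cnf.append([base + i for i in range(s, e + 1)])
--     return cnf
-- ===== Notes on version B (the rewrite author's own statement) =====
-- stated objective: alternative
-- what changed: A's single stateful loop (prev-set comparison, a mutable group accumulator and a trailing flush) is replaced by index arithmetic: helper variables are base+i in closed form, run boundaries are found by comparing each key with its neighbour, the left and right boundary lists are zipped into intervals, and each interval is emitted independently.
import Mathlib
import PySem

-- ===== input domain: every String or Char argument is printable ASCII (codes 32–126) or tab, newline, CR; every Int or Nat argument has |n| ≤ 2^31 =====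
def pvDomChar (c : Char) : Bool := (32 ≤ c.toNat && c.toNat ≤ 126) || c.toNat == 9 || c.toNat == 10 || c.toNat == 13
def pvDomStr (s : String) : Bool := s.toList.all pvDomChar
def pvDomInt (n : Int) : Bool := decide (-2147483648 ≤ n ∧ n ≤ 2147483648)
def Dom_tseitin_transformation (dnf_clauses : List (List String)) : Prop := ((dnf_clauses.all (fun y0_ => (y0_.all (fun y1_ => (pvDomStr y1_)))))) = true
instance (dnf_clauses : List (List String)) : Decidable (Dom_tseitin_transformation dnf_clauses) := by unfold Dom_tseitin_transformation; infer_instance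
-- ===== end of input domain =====

-- B replaces A's single stateful loop (prev-set comparison, mutable group accumulator, trailing
-- flush) by index arithmetic: helpers are base+i in closed form, run boundaries are found by
-- neighbour comparisons, the start/end boundary lists are zipped into intervals and each interval
-- is emitted independently. Same output, same cost.

-- list(map(int, clause[0].split())) — identical line in both Pythons;
-- getD is only reached outside Pre_ (Python raises there).
def pvParseClause (clause : List String) : List Int :=
  (PySem.Str.split₀ ((PySem.List.pyGet? clause 0).getD "")).map (fun t => (PySem.Int.ofStr? t).getD 0)

-- set(map(abs, literals)) — identical expression in both Pythons
def pvKeyOf (lits : List Int) : PySem.Set Int :=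
  PySem.Set.ofList (lits.map (fun l => |l|))

-- ===== PORT A =====
def find_first_helper_variable (dnf_clauses : List (List String)) : Int :=
  (dnf_clauses.foldl (fun max_var clause =>
    let literals := pvParseClause clause
    match PySem.List.max? (literals.map (fun l => |l|)) (fun y => y) with
    | some m => max max_var m
    | none => max_var) 0) + 1

def pvLoopA : List (List String) → Int → PySem.Set Int → List Int → List (List Int) → List (List Int)
  | [], _, _, grp, cnf => if grp = [] then cnf else cnf ++ [grp]
  | clause :: rest, next, prev, grp, cnf =>
    let literals := pvParseClause clause
    let lset := pvKeyOf literals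
    if PySem.Set.equal lset prev then
      pvLoopA rest (next + 1) lset (grp ++ [next]) (cnf ++ literals.map (fun l => [-next, l]))
    else
      pvLoopA rest (next + 1) lset [next]
        ((if grp = [] then cnf else cnf ++ [grp]) ++ literals.map (fun l => [-next, l]))

def tseitin_transformation (dnf_clauses : List (List String)) : List (List Int) :=
  pvLoopA dnf_clauses (find_first_helper_variable dnf_clauses) PySem.Set.empty [] []

-- ===== PORT B =====
def tseitin_transformation_alt (dnf_clauses : List (List String)) : List (List Int) :=
  let parsed := dnf_clauses.map pvParseClause
  let base := 1 + PySem.List.maxD ((parsed.flatMap (fun x => x)).map (fun l => |l|)) (fun y => y) 0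
  let keys := parsed.map pvKeyOf
  let n : Int := (keys.length : Int)
  let starts := (PySem.List.pyRange 0 n 1).filter (fun i =>
    i == 0 || !(PySem.Set.equal ((PySem.List.pyGet? keys i).getD PySem.Set.empty)
                                ((PySem.List.pyGet? keys (i - 1)).getD PySem.Set.empty)))
  let ends := (PySem.List.pyRange 0 n 1).filter (fun i =>
    i == n - 1 || !(PySem.Set.equal ((PySem.List.pyGet? keys i).getD PySem.Set.empty)
                                    ((PySem.List.pyGet? keys (i + 1)).getD PySem.Set.empty)))
  (starts.zip ends).flatMap (fun se =>
    (PySem.List.pyRange se.1 (se.2 + 1) 1).flatMap (fun i =>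
      ((PySem.List.pyGet? parsed i).getD []).map (fun l => [-(base + i), l]))
    ++ [(PySem.List.pyRange se.1 (se.2 + 1) 1).map (fun i => base + i)])

-- ===== PRECONDITION & SPEC =====
-- Pre_ excludes exactly the inputs on which A raises: a clause that is the empty list (IndexError on
-- clause[0]), a token int() rejects (ValueError), or a clause whose literal string has no tokens
-- (ValueError from max() over an empty sequence).
def Pre_tseitin_transformation (dnf_clauses : List (List String)) : Prop :=
  ∀ clause ∈ dnf_clauses, clause ≠ [] ∧ PySem.Str.split₀ (clause.headD "") ≠ [] ∧
    ∀ t ∈ PySem.Str.split₀ (clause.headD ""), (PySem.Int.ofStr? t).isSome = true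
instance (dnf_clauses : List (List String)) : Decidable (Pre_tseitin_transformation dnf_clauses) := by
  unfold Pre_tseitin_transformation; infer_instance

def pvWitness_tseitin_transformation : List (List String) := [["1 -2"], ["2 1"], ["3"]]

def Spec_tseitin_transformation (dnf_clauses : List (List String)) (out : List (List Int)) : Prop :=
  out = tseitin_transformation_alt dnf_clauses
instance (dnf_clauses : List (List String)) (out : List (List Int)) : Decidable (Spec_tseitin_transformation dnf_clauses out) := by
  unfold Spec_tseitin_transformation; infer_instance

-- ===== CLAIM (what is proved, stated in full; the proofs are below) =====
def Claim_equal_tseitin_transformation : Prop := ∀ (dnf_clauses : List (List String)), Dom_tseitin_transformation dnf_clauses → Pre_tseitin_transformation dnf_clauses → Spec_tseitin_transformation dnf_clauses (tseitin_transformation dnf_clauses)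

-- ===== LEMMAS AND PROOFS =====

-- ---- A side: pvLoopA with the cnf accumulator factored out ----
def pvE : List (List Int) → Int → PySem.Set Int → List Int → List (List Int)
  | [], _, _, grp => if grp = [] then [] else [grp]
  | lits :: rest, next, prev, grp =>
    if PySem.Set.equal (pvKeyOf lits) prev then
      lits.map (fun l => [-next, l]) ++ pvE rest (next + 1) (pvKeyOf lits) (grp ++ [next])
    else
      (if grp = [] then [] else [grp]) ++ lits.map (fun l => [-next, l]) ++ pvE rest (next + 1) (pvKeyOf lits) [next]

theorem pvLoopA_eq_pvE (rest : List (List String)) :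
    ∀ (next : Int) (prev : PySem.Set Int) (grp : List Int) (cnf : List (List Int)),
    pvLoopA rest next prev grp cnf = cnf ++ pvE (rest.map pvParseClause) next prev grp := by
  induction rest with
  | nil =>
    intro next prev grp cnf
    simp only [pvLoopA, pvE, List.map_nil]
    split <;> simp
  | cons c rest ih =>
    intro next prev grp cnf
    simp only [pvLoopA, pvE, List.map_cons]
    split
    · rw [ih]; simp
    · rw [ih]; split <;> simp

theorem pvFoldlMaxComm (t : List Int) : ∀ (a b : Int), t.foldl max (max a b) = max a (t.foldl max b) := by
  induction t with
  | nil => intro a b; simp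
  | cons x t ih =>
    intro a b
    simp only [List.foldl_cons]
    rw [max_assoc, ih]

theorem pvBaseFold (l : List (List String)) :
    ∀ (acc : Int), (∀ c ∈ l, pvParseClause c ≠ []) →
    l.foldl (fun max_var clause =>
      match PySem.List.max? ((pvParseClause clause).map (fun x => |x|)) (fun y => y) with
      | some m => max max_var m
      | none => max_var) acc
    = (((l.map pvParseClause).flatMap (fun x => x)).map (fun x => |x|)).foldl max acc := by
  induction l with
  | nil => intro acc _; simp
  | cons c l ih =>
    intro acc h
    obtain ⟨a, t, hat⟩ := List.exists_cons_of_ne_nil (h c (by simp))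
    simp only [List.foldl_cons, List.map_cons, List.flatMap_cons, List.map_append, hat,
      PySem.List.max?_id_cons, List.foldl_append]
    rw [ih _ (fun c' hc' => h c' (by simp [hc']))]
    congr 1
    rw [pvFoldlMaxComm]

theorem pvBase_eq (dnf_clauses : List (List String))
    (h : ∀ clause ∈ dnf_clauses, pvParseClause clause ≠ []) :
    find_first_helper_variable dnf_clauses
      = 1 + PySem.List.maxD (((dnf_clauses.map pvParseClause).flatMap (fun x => x)).map (fun l => |l|)) (fun y => y) 0 := by
  unfold find_first_helper_variable
  rw [pvBaseFold dnf_clauses 0 h]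
  cases hf : ((dnf_clauses.map pvParseClause).flatMap (fun x => x)).map (fun x => |x|) with
  | nil => simp [PySem.List.maxD_nil]
  | cons a t =>
    have ha : 0 ≤ a := by
      have : a ∈ ((dnf_clauses.map pvParseClause).flatMap (fun x => x)).map (fun x => |x|) := by
        rw [hf]; simp
      obtain ⟨y, _, hy⟩ := List.mem_map.mp this
      rw [← hy]; exact abs_nonneg y
    rw [PySem.List.maxD_id_cons]
    simp only [List.foldl_cons]
    rw [show max 0 a = max a 0 from max_comm 0 a, pvFoldlMaxComm]
    have h2 : List.foldl max a t = max a (List.foldl max 0 t) := by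
      rw [← pvFoldlMaxComm t a 0, max_eq_left ha]
    rw [h2, add_comm]

theorem pvHeadGet (c : List String) (hc : c ≠ []) :
    (PySem.List.pyGet? c 0).getD "" = c.headD "" := by
  cases c with
  | nil => exact absurd rfl hc
  | cons x xs =>
    have : ((0 : Int)) = ((0 : Nat) : Int) := rfl
    rw [this, PySem.List.pyGet?_natCast]
    rfl

-- ---- Set.equal glue ----
theorem pvEqRefl (s : PySem.Set Int) : PySem.Set.equal s s = true :=
  (PySem.Set.equal_iff s s).mpr (fun _ => Iff.rfl)

theorem pvEqOfMemIff (a k p : PySem.Set Int) (h1 : PySem.Set.equal a k = true)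
    (h2 : ∀ x : Int, x ∈ p ↔ x ∈ k) : PySem.Set.equal a p = true :=
  (PySem.Set.equal_iff a p).mpr (fun x => ((PySem.Set.equal_iff a k).mp h1 x).trans (h2 x).symm)

theorem pvEqTrans (a b k : PySem.Set Int) (h1 : PySem.Set.equal a k = true)
    (h2 : PySem.Set.equal b k = true) : PySem.Set.equal a b = true :=
  (PySem.Set.equal_iff a b).mpr (fun x => ((PySem.Set.equal_iff a k).mp h1 x).trans
    (((PySem.Set.equal_iff b k).mp h2 x).symm))

theorem pvEqFalse (a b k : PySem.Set Int) (h1 : PySem.Set.equal a k = false)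
    (h2 : PySem.Set.equal b k = true) : PySem.Set.equal a b = false := by
  cases hab : PySem.Set.equal a b with
  | false => rfl
  | true =>
    have : PySem.Set.equal a k = true :=
      (PySem.Set.equal_iff a k).mpr (fun x => ((PySem.Set.equal_iff a b).mp hab x).trans
        ((PySem.Set.equal_iff b k).mp h2 x))
    rw [this] at h1; cases h1

-- ---- the run-peeling interval decomposition both programs compute ----
def pvIv : List (PySem.Set Int) → List (Nat × Nat)
  | [] => []
  | k :: rest =>
    (0, (rest.takeWhile (fun k' => PySem.Set.equal k' k)).length)
      :: (pvIv (rest.drop (rest.takeWhile (fun k' => PySem.Set.equal k' k)).length)).map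
          (fun p => (p.1 + ((rest.takeWhile (fun k' => PySem.Set.equal k' k)).length + 1),
                     p.2 + ((rest.takeWhile (fun k' => PySem.Set.equal k' k)).length + 1)))
termination_by K => K.length
decreasing_by
  simp only [List.length_cons, List.length_drop]
  omega

theorem pvIv_bounds (K : List (PySem.Set Int)) :
    ∀ p ∈ pvIv K, p.1 ≤ p.2 ∧ p.2 < K.length := by
  induction K using pvIv.induct with
  | case1 => intro p hp; simp [pvIv] at hp
  | case2 k rest ih =>
    intro p hp
    rw [pvIv] at hp
    simp only [List.mem_cons, List.mem_map] at hp
    rcases hp with h | ⟨q, hq, hpq⟩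
    · subst h
      constructor
      · exact Nat.zero_le _
      · have := (List.takeWhile_prefix (l := rest) (fun k' => PySem.Set.equal k' k)).length_le
        simp only [List.length_cons]
        omega
    · obtain ⟨h1, h2⟩ := ih q hq
      subst hpq
      simp only [List.length_drop] at h2
      simp only [List.length_cons]
      omega

-- small structural facts used to walk runs
theorem pvDropTakeWhile {α : Type} (p : α → Bool) (l : List α) :
    l.drop (l.takeWhile p).length = l.dropWhile p := by
  induction l with
  | nil => rfl
  | cons x t ih =>
    by_cases hx : p x = true
    · simp [hx, ih]
    · simp [hx]

theorem pvDropWhileHead {α : Type} (p : α → Bool) (l : List α) (x : α) (t : List α)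
    (h : l.dropWhile p = x :: t) : p x = false := by
  induction l with
  | nil => cases h
  | cons a l ih =>
    by_cases ha : p a = true
    · rw [List.dropWhile_cons, if_pos ha] at h; exact ih h
    · rw [List.dropWhile_cons, if_neg ha] at h
      cases h; simpa using ha

-- ---- the common emission of one interval ----
def pvEmitN (base : Int) (parsed : List (List Int)) (se : Nat × Nat) : List (List Int) :=
  ((List.range (se.2 + 1 - se.1)).map (fun j => se.1 + j)).flatMap
    (fun idx => (parsed.getD idx []).map (fun l => [-(base + (idx : Int)), l]))
  ++ [((List.range (se.2 + 1 - se.1)).map (fun j => se.1 + j)).map (fun (idx : Nat) => base + (idx : Int))]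

def pvImpls : List (List Int) → Int → List (List Int)
  | [], _ => []
  | b :: bs, n => b.map (fun l => [-n, l]) ++ pvImpls bs (n + 1)

def pvHelpers (n : Int) : Nat → List Int
  | 0 => []
  | m + 1 => n :: pvHelpers (n + 1) m

theorem pvImpls_eq (base : Int) (parsed : List (List Int)) :
    ∀ (blk : List (List Int)) (i : Nat),
    (∀ j, j < blk.length → parsed.getD (i + j) [] = blk.getD j []) →
    pvImpls blk (base + (i : Int))
      = ((List.range blk.length).map (fun j => i + j)).flatMap
          (fun idx => (parsed.getD idx []).map (fun l => [-(base + (idx : Int)), l])) := by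
  intro blk
  induction blk with
  | nil => intro i _; simp [pvImpls]
  | cons b bs ih =>
    intro i h
    have h0 : parsed.getD i [] = b := by
      have := h 0 (by simp)
      simpa using this
    simp only [pvImpls, List.length_cons, List.range_succ_eq_map, List.map_cons, List.map_map,
      List.flatMap_cons, Nat.add_zero, h0]
    congr 1
    have hmap : ((List.range bs.length).map ((fun j => i + j) ∘ Nat.succ))
        = (List.range bs.length).map (fun j => (i + 1) + j) := by
      apply List.map_congr_left; intro j _; simp only [Function.comp]; omega
    rw [hmap]
    have hc : base + (i : Int) + 1 = base + ((i + 1 : Nat) : Int) := by push_cast; ring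
    rw [hc, ih (i + 1) (fun j hj => by
      have := h (j + 1) (by simpa using Nat.succ_lt_succ hj)
      simpa [Nat.add_assoc, Nat.add_comm 1 j] using this)]

theorem pvHelpers_eq (base : Int) :
    ∀ (r i : Nat),
    pvHelpers (base + (i : Int)) r
      = ((List.range r).map (fun j => i + j)).map (fun (idx : Nat) => base + (idx : Int)) := by
  intro r
  induction r with
  | zero => intro i; simp [pvHelpers]
  | succ m ih =>
    intro i
    simp only [pvHelpers, List.range_succ_eq_map, List.map_cons, List.map_map, Nat.add_zero]
    congr 1
    have hc : base + (i : Int) + 1 = base + ((i + 1 : Nat) : Int) := by push_cast; ring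
    rw [hc, ih (i + 1), List.map_map]
    apply List.map_congr_left; intro j _
    simp only [Function.comp]
    congr 1
    omega

-- ---- pvE invariance in the previous-key argument (only membership matters) ----
theorem pvE_congr_prev (t : List (List Int)) (n : Int) (p1 p2 : PySem.Set Int) (g : List Int)
    (h : ∀ x : Int, x ∈ p1 ↔ x ∈ p2) : pvE t n p1 g = pvE t n p2 g := by
  cases t with
  | nil => rfl
  | cons lits rest =>
    have : PySem.Set.equal (pvKeyOf lits) p1 = PySem.Set.equal (pvKeyOf lits) p2 := by
      cases h1 : PySem.Set.equal (pvKeyOf lits) p1 with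
      | true => exact (pvEqOfMemIff _ _ _ h1 (fun x => (h x).symm)).symm
      | false =>
        cases h2 : PySem.Set.equal (pvKeyOf lits) p2 with
        | false => rfl
        | true =>
          have := pvEqOfMemIff _ _ _ h2 h
          rw [this] at h1; cases h1
    simp only [pvE, this]

-- consume a block of clauses whose keys all equal k, entering with prev ≃ k
theorem pvE_block (block : List (List Int)) :
    ∀ (rest2 : List (List Int)) (nxt : Int) (k prev : PySem.Set Int) (grp : List Int),
    (∀ b ∈ block, PySem.Set.equal (pvKeyOf b) k = true) →
    (∀ x : Int, x ∈ prev ↔ x ∈ k) →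
    pvE (block ++ rest2) nxt prev grp
      = pvImpls block nxt ++ pvE rest2 (nxt + (block.length : Int)) prev (grp ++ pvHelpers nxt block.length) := by
  induction block with
  | nil => intro rest2 nxt k prev grp _ _; simp [pvImpls, pvHelpers]
  | cons b bs ih =>
    intro rest2 nxt k prev grp hq hpk
    have hb : PySem.Set.equal (pvKeyOf b) prev = true :=
      pvEqOfMemIff _ _ _ (hq b (by simp)) hpk
    simp only [List.cons_append, pvE, hb, if_pos]
    rw [pvE_congr_prev (bs ++ rest2) (nxt + 1) (pvKeyOf b) prev (grp ++ [nxt])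
      (fun x => ((PySem.Set.equal_iff _ _).mp hb x))]
    rw [ih rest2 (nxt + 1) k prev (grp ++ [nxt]) (fun b' hb' => hq b' (by simp [hb'])) hpk]
    simp only [pvImpls, List.length_cons, pvHelpers, List.append_assoc]
    have h1 : nxt + 1 + (bs.length : Int) = nxt + ((bs.length + 1 : Nat) : Int) := by push_cast; ring
    rw [h1]
    congr 2

theorem pvE_flush (rest2 : List (List Int)) (n : Int) (k : PySem.Set Int) (grp : List Int)
    (h : ∀ l0 ∈ rest2.head?, PySem.Set.equal (pvKeyOf l0) k = false) :
    pvE rest2 n k grp = (if grp = [] then [] else [grp]) ++ pvE rest2 n k [] := by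
  cases rest2 with
  | nil => simp [pvE]
  | cons lits rest =>
    have hf : PySem.Set.equal (pvKeyOf lits) k = false := h lits (by simp)
    simp [pvE, hf]

-- ---- the main A-side characterisation: pvE from a fresh state emits pvIv's intervals ----
theorem pvE_iv (base : Int) (parsed : List (List Int)) :
    ∀ (N : Nat) (tail : List (List Int)) (i : Nat) (prev : PySem.Set Int),
    tail.length ≤ N → parsed.drop i = tail →
    (∀ l0 ∈ tail.head?, PySem.Set.equal (pvKeyOf l0) prev = false) →
    pvE tail (base + (i : Int)) prev []
      = (pvIv (tail.map pvKeyOf)).flatMap (fun p => pvEmitN base parsed (p.1 + i, p.2 + i)) := by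
  intro N
  induction N with
  | zero =>
    intro tail i prev hN hdrop _
    have ht : tail = [] := List.eq_nil_of_length_eq_zero (Nat.le_zero.mp hN)
    subst ht
    simp [pvE, pvIv]
  | succ N ih =>
    intro tail i prev hN hdrop hfresh
    cases tail with
    | nil => simp [pvE, pvIv]
    | cons lits rest =>
      have hf : PySem.Set.equal (pvKeyOf lits) prev = false := hfresh lits (by simp)
      -- names
      have hq : ∀ b ∈ rest.takeWhile (fun b => PySem.Set.equal (pvKeyOf b) (pvKeyOf lits)),
          PySem.Set.equal (pvKeyOf b) (pvKeyOf lits) = true :=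
        fun b hb => List.mem_takeWhile_imp (p := fun b => PySem.Set.equal (pvKeyOf b) (pvKeyOf lits)) hb
      -- shorthand
      generalize hB : rest.takeWhile (fun b => PySem.Set.equal (pvKeyOf b) (pvKeyOf lits)) = block' at hq
      generalize hR : rest.dropWhile (fun b => PySem.Set.equal (pvKeyOf b) (pvKeyOf lits)) = rest2
      have hdropB : rest.drop block'.length = rest2 := by
        rw [← hB, ← hR]
        exact pvDropTakeWhile _ rest
      have hfresh2 : ∀ l0 ∈ rest2.head?, PySem.Set.equal (pvKeyOf l0) (pvKeyOf lits) = false := by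
        intro l0 hl0
        cases hc : rest2 with
        | nil => rw [hc] at hl0; simp at hl0
        | cons x t =>
          rw [hc] at hl0; simp at hl0; subst hl0
          exact pvDropWhileHead _ rest x t (by rw [hR, hc])
      -- step 1: unfold the first clause (run boundary)
      have step1 : pvE (lits :: rest) (base + (i : Int)) prev []
          = lits.map (fun l => [-(base + (i : Int)), l])
            ++ pvE rest (base + (i : Int) + 1) (pvKeyOf lits) [base + (i : Int)] := by
        simp [pvE, hf]
      -- step 2: consume the rest of the run
      have hsplit : rest = block' ++ rest2 := by rw [← hB, ← hR, List.takeWhile_append_dropWhile]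
      have step2 : pvE rest (base + (i : Int) + 1) (pvKeyOf lits) [base + (i : Int)]
          = pvImpls block' (base + (i : Int) + 1)
            ++ pvE rest2 (base + (i : Int) + 1 + (block'.length : Int)) (pvKeyOf lits)
                (pvHelpers (base + (i : Int)) (block'.length + 1)) := by
        conv_lhs => rw [hsplit]
        rw [pvE_block block' rest2 (base + (i : Int) + 1) (pvKeyOf lits) (pvKeyOf lits)
          [base + (i : Int)] hq (fun _ => Iff.rfl)]
        rfl
      -- step 3: the helper clause of this run is flushed before the next run
      have hne : pvHelpers (base + (i : Int)) (block'.length + 1) ≠ [] := by simp [pvHelpers]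
      have step3 : pvE rest2 (base + (i : Int) + 1 + (block'.length : Int)) (pvKeyOf lits)
            (pvHelpers (base + (i : Int)) (block'.length + 1))
          = [pvHelpers (base + (i : Int)) (block'.length + 1)]
            ++ pvE rest2 (base + (i : Int) + 1 + (block'.length : Int)) (pvKeyOf lits) [] := by
        rw [pvE_flush rest2 _ _ _ hfresh2, if_neg hne]
      -- step 4: induction hypothesis on the remaining runs
      have hlen : rest2.length ≤ N := by
        have h1 : rest2.length ≤ rest.length := by
          rw [← hR]; exact List.length_dropWhile_le _ rest
        simp only [List.length_cons] at hN
        omega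
      have hdrop' : parsed.drop (i + (block'.length + 1)) = rest2 := by
        have : (parsed.drop i).drop (block'.length + 1) = parsed.drop (i + (block'.length + 1)) := by
          rw [List.drop_drop, Nat.add_comm]
        rw [← this, hdrop]
        simpa using hdropB
      have hcast : base + (i : Int) + 1 + (block'.length : Int)
          = base + ((i + (block'.length + 1) : Nat) : Int) := by push_cast; ring
      have step4 : pvE rest2 (base + (i : Int) + 1 + (block'.length : Int)) (pvKeyOf lits) []
          = (pvIv (rest2.map pvKeyOf)).flatMap
              (fun p => pvEmitN base parsed (p.1 + (i + (block'.length + 1)), p.2 + (i + (block'.length + 1)))) := by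
        rw [hcast]
        exact ih rest2 (i + (block'.length + 1)) (pvKeyOf lits) hlen hdrop' hfresh2
      -- the RHS: one pvIv step
      have hIv : pvIv ((lits :: rest).map pvKeyOf)
          = (0, block'.length)
            :: (pvIv (rest2.map pvKeyOf)).map
                (fun p => (p.1 + (block'.length + 1), p.2 + (block'.length + 1))) := by
        rw [List.map_cons, pvIv]
        have htk : (rest.map pvKeyOf).takeWhile (fun k' => PySem.Set.equal k' (pvKeyOf lits))
            = block'.map pvKeyOf := by
          rw [List.takeWhile_map]
          simp only [Function.comp_def]
          rw [hB]
        rw [htk]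
        simp only [List.length_map]
        rw [← List.map_drop, hdropB]
      -- the first interval's emission
      have hfirst : pvEmitN base parsed (0 + i, block'.length + i)
          = lits.map (fun l => [-(base + (i : Int)), l])
            ++ pvImpls block' (base + (i : Int) + 1)
            ++ [pvHelpers (base + (i : Int)) (block'.length + 1)] := by
        have hgetD : ∀ j, j < (lits :: block').length → parsed.getD (i + j) [] = (lits :: block').getD j [] := by
          intro j hj
          rw [List.getD_eq_getElem?_getD, List.getD_eq_getElem?_getD, ← List.getElem?_drop, hdrop]
          cases j with
          | zero => rfl
          | succ j' =>
            simp only [List.length_cons] at hj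
            have hj' : j' < block'.length := Nat.lt_of_succ_lt_succ hj
            simp only [List.getElem?_cons_succ]
            have hbt : block' = rest.take block'.length := by
              rw [← hB]
              exact List.prefix_iff_eq_take.mp (List.takeWhile_prefix _)
            conv_rhs => rw [hbt]
            rw [List.getElem?_take_of_lt hj']
        have himp := pvImpls_eq base parsed (lits :: block') i hgetD
        simp only [List.length_cons] at himp
        have hhel := pvHelpers_eq base (block'.length + 1) i
        unfold pvEmitN
        have hrange : block'.length + i + 1 - (0 + i) = block'.length + 1 := by omega
        have hidx : ((List.range (block'.length + 1)).map (fun j => 0 + i + j))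
            = (List.range (block'.length + 1)).map (fun j => i + j) := by
          apply List.map_congr_left; intro j _; omega
        simp only [hrange, hidx]
        rw [← himp, ← hhel]
        simp only [pvImpls, List.append_assoc]
      -- assemble
      rw [step1, step2, step3, step4, hIv]
      simp only [List.flatMap_cons, List.flatMap_map]
      have hfun : (fun p : Nat × Nat =>
            pvEmitN base parsed (p.1 + (block'.length + 1) + i, p.2 + (block'.length + 1) + i))
          = (fun p : Nat × Nat =>
            pvEmitN base parsed (p.1 + (i + (block'.length + 1)), p.2 + (i + (block'.length + 1)))) := by
        funext p
        have h1 : p.1 + (block'.length + 1) + i = p.1 + (i + (block'.length + 1)) := by omega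
        have h2 : p.2 + (block'.length + 1) + i = p.2 + (i + (block'.length + 1)) := by omega
        rw [h1, h2]
      rw [hfun, hfirst]
      simp [List.append_assoc]

-- ---- Nat-level boundary lists and their identification with pvIv ----
def pvStarts (K : List (PySem.Set Int)) : List Nat :=
  (List.range K.length).filter (fun i =>
    i == 0 || !(PySem.Set.equal (K.getD i PySem.Set.empty) (K.getD (i - 1) PySem.Set.empty)))

def pvEnds (K : List (PySem.Set Int)) : List Nat :=
  (List.range K.length).filter (fun i =>
    i == K.length - 1 || !(PySem.Set.equal (K.getD i PySem.Set.empty) (K.getD (i + 1) PySem.Set.empty)))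

theorem pvEqFalse2 (a b k : PySem.Set Int) (h1 : PySem.Set.equal a k = true)
    (h2 : PySem.Set.equal b k = false) : PySem.Set.equal a b = false := by
  cases hab : PySem.Set.equal a b with
  | false => rfl
  | true =>
    have : PySem.Set.equal b k = true :=
      (PySem.Set.equal_iff b k).mpr (fun x => (((PySem.Set.equal_iff a b).mp hab x).symm).trans
        ((PySem.Set.equal_iff a k).mp h1 x))
    rw [this] at h2; cases h2

-- facts about one run inside a key list k :: rest (m = run length - 1, R = the tail after the run)
theorem pvRunMemEq (k : PySem.Set Int) (rest : List (PySem.Set Int)) :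
    ∀ j < (rest.takeWhile (fun k' => PySem.Set.equal k' k)).length,
    PySem.Set.equal (rest.getD j PySem.Set.empty) k = true := by
  intro j hj
  have ht : rest.takeWhile (fun k' => PySem.Set.equal k' k)
      = rest.take (rest.takeWhile (fun k' => PySem.Set.equal k' k)).length :=
    List.prefix_iff_eq_take.mp (List.takeWhile_prefix _)
  have hmem : (rest.takeWhile (fun k' => PySem.Set.equal k' k))[j] ∈
      rest.takeWhile (fun k' => PySem.Set.equal k' k) := List.getElem_mem hj
  have hpred := List.mem_takeWhile_imp (p := fun k' => PySem.Set.equal k' k) hmem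
  have hgd : rest.getD j PySem.Set.empty = (rest.takeWhile (fun k' => PySem.Set.equal k' k))[j] := by
    rw [List.getD_eq_getElem?_getD, ← List.getElem?_take_of_lt (l := rest) hj,
      ← ht, List.getElem?_eq_getElem hj]
    rfl
  rw [hgd]
  exact hpred

theorem pvRunGetDrop (k : PySem.Set Int) (rest : List (PySem.Set Int)) (m j : Nat) :
    (k :: rest).getD (m + 1 + j) PySem.Set.empty = (rest.drop m).getD j PySem.Set.empty := by
  have h1 : m + 1 + j = (m + j) + 1 := by omega
  rw [h1, List.getD_cons_succ, List.getD_eq_getElem?_getD, List.getD_eq_getElem?_getD,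
    List.getElem?_drop]

theorem pvStarts_eq (K : List (PySem.Set Int)) : pvStarts K = (pvIv K).map (fun p => p.1) := by
  induction K using pvIv.induct with
  | case1 => simp [pvStarts, pvIv]
  | case2 k rest ih =>
    have hmle : (rest.takeWhile (fun k' => PySem.Set.equal k' k)).length ≤ rest.length :=
      (List.takeWhile_prefix _).length_le
    generalize hm : (rest.takeWhile (fun k' => PySem.Set.equal k' k)).length = m at *
    generalize hRR : rest.drop m = R at *
    have hRlen : R.length = rest.length - m := by rw [← hRR]; exact List.length_drop
    have hF1 : ∀ i ≤ m, PySem.Set.equal ((k :: rest).getD i PySem.Set.empty) k = true := by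
      intro i hi
      cases i with
      | zero => rw [List.getD_cons_zero]; exact pvEqRefl k
      | succ j =>
        rw [List.getD_cons_succ]
        exact pvRunMemEq k rest j (by omega)
    have hF2 : ∀ x t, R = x :: t → PySem.Set.equal x k = false := by
      intro x t hxt
      have hdw : rest.dropWhile (fun k' => PySem.Set.equal k' k) = x :: t := by
        rw [← pvDropTakeWhile (fun k' => PySem.Set.equal k' k) rest, hm, hRR, hxt]
      exact pvDropWhileHead _ rest x t hdw
    have hF3 : ∀ j, (k :: rest).getD (m + 1 + j) PySem.Set.empty = R.getD j PySem.Set.empty := by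
      intro j; rw [← hRR]; exact pvRunGetDrop k rest m j
    -- unfold the fixed point
    rw [pvIv]
    simp only [hm, hRR]
    unfold pvStarts
    simp only [List.length_cons]
    have hn : rest.length + 1 = (m + 1) + R.length := by omega
    rw [hn, List.range_add, List.filter_append]
    -- part 1: within the run only index 0 is a start
    have hpart1 : (List.range (m + 1)).filter (fun i =>
        i == 0 || !(PySem.Set.equal ((k :: rest).getD i PySem.Set.empty)
          ((k :: rest).getD (i - 1) PySem.Set.empty))) = [0] := by
      rw [List.range_succ_eq_map]
      rw [List.filter_cons]
      simp only [show ((0 == 0) || !(PySem.Set.equal ((k :: rest).getD 0 PySem.Set.empty)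
        ((k :: rest).getD (0 - 1) PySem.Set.empty))) = true by simp, if_pos]
      congr 1
      rw [List.filter_eq_nil_iff]
      intro a ha
      obtain ⟨j, hj, rfl⟩ := List.mem_map.mp ha
      have hj' : j < m := List.mem_range.mp hj
      have h1 : PySem.Set.equal ((k :: rest).getD (j + 1) PySem.Set.empty) k = true :=
        hF1 (j + 1) (by omega)
      have h2 : PySem.Set.equal ((k :: rest).getD j PySem.Set.empty) k = true :=
        hF1 j (by omega)
      have h3 := pvEqTrans _ _ _ h1 h2
      simp only [Nat.succ_eq_add_one, Nat.add_sub_cancel, h3]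
      simp
    rw [hpart1]
    -- part 2: the remaining indices shift
    rw [List.filter_map, List.filter_congr (q := fun j =>
        j == 0 || !(PySem.Set.equal (R.getD j PySem.Set.empty)
          (R.getD (j - 1) PySem.Set.empty))) ?_]
    · rw [show (List.range R.length).filter (fun j =>
          j == 0 || !(PySem.Set.equal (R.getD j PySem.Set.empty)
            (R.getD (j - 1) PySem.Set.empty))) = pvStarts R from rfl, ih]
      simp only [List.map_map, List.map_cons, List.singleton_append]
      congr 1
      apply List.map_congr_left
      intro p _
      simp only [Function.comp]
      omega
    · intro j hj
      have hjR : j < R.length := List.mem_range.mp hj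
      simp only [Function.comp]
      cases j with
      | zero =>
        have hRne : R ≠ [] := by intro hnil; rw [hnil] at hjR; simp at hjR
        obtain ⟨x, t, hxt⟩ := List.exists_cons_of_ne_nil hRne
        have hx : R.getD 0 PySem.Set.empty = x := by rw [hxt]; rfl
        have hKm1 : (k :: rest).getD (m + 1 + 0) PySem.Set.empty = x := by rw [hF3 0, hx]
        have hKm : PySem.Set.equal ((k :: rest).getD (m + 1 + 0 - 1) PySem.Set.empty) k = true := by
          have : m + 1 + 0 - 1 = m := by omega
          rw [this]; exact hF1 m (by omega)
        have hfalse := pvEqFalse ((k :: rest).getD (m + 1 + 0) PySem.Set.empty)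
          ((k :: rest).getD (m + 1 + 0 - 1) PySem.Set.empty) k
          (by rw [hKm1]; exact hF2 x t hxt) hKm
        have hone : (m + 1 + 0 == 0) = false := by simp only [beq_eq_false_iff_ne]; omega
        rw [hone, hfalse]
        simp
      | succ j' =>
        have hg1 : (m + 1 + (j' + 1) == 0) = false := by simp only [beq_eq_false_iff_ne]; omega
        have hg2 : (j' + 1 == 0) = false := by simp only [beq_eq_false_iff_ne]; omega
        rw [hg1, hg2]
        have e1 : (k :: rest).getD (m + 1 + (j' + 1)) PySem.Set.empty
            = R.getD (j' + 1) PySem.Set.empty := hF3 (j' + 1)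
        have e2 : (k :: rest).getD (m + 1 + (j' + 1) - 1) PySem.Set.empty
            = R.getD j' PySem.Set.empty := by
          have : m + 1 + (j' + 1) - 1 = m + 1 + j' := by omega
          rw [this]; exact hF3 j'
        rw [e1, e2]
        simp

theorem pvEnds_eq (K : List (PySem.Set Int)) : pvEnds K = (pvIv K).map (fun p => p.2) := by
  induction K using pvIv.induct with
  | case1 => simp [pvEnds, pvIv]
  | case2 k rest ih =>
    have hmle : (rest.takeWhile (fun k' => PySem.Set.equal k' k)).length ≤ rest.length :=
      (List.takeWhile_prefix _).length_le
    generalize hm : (rest.takeWhile (fun k' => PySem.Set.equal k' k)).length = m at *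
    generalize hRR : rest.drop m = R at *
    have hRlen : R.length = rest.length - m := by rw [← hRR]; exact List.length_drop
    have hF1 : ∀ i ≤ m, PySem.Set.equal ((k :: rest).getD i PySem.Set.empty) k = true := by
      intro i hi
      cases i with
      | zero => rw [List.getD_cons_zero]; exact pvEqRefl k
      | succ j =>
        rw [List.getD_cons_succ]
        exact pvRunMemEq k rest j (by omega)
    have hF2 : ∀ x t, R = x :: t → PySem.Set.equal x k = false := by
      intro x t hxt
      have hdw : rest.dropWhile (fun k' => PySem.Set.equal k' k) = x :: t := by
        rw [← pvDropTakeWhile (fun k' => PySem.Set.equal k' k) rest, hm, hRR, hxt]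
      exact pvDropWhileHead _ rest x t hdw
    have hF3 : ∀ j, (k :: rest).getD (m + 1 + j) PySem.Set.empty = R.getD j PySem.Set.empty := by
      intro j; rw [← hRR]; exact pvRunGetDrop k rest m j
    rw [pvIv]
    simp only [hm, hRR]
    unfold pvEnds
    simp only [List.length_cons, Nat.add_sub_cancel]
    have hn : rest.length + 1 = (m + 1) + R.length := by omega
    rw [hn, List.range_add, List.filter_append]
    -- part 1: within the run only the last index is an end
    have hpart1 : (List.range (m + 1)).filter (fun i =>
        i == rest.length || !(PySem.Set.equal ((k :: rest).getD i PySem.Set.empty)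
          ((k :: rest).getD (i + 1) PySem.Set.empty))) = [m] := by
      rw [List.range_succ, List.filter_append]
      have h1 : (List.range m).filter (fun i =>
          i == rest.length || !(PySem.Set.equal ((k :: rest).getD i PySem.Set.empty)
            ((k :: rest).getD (i + 1) PySem.Set.empty))) = [] := by
        rw [List.filter_eq_nil_iff]
        intro i hi
        have hi' : i < m := List.mem_range.mp hi
        have hguard : (i == rest.length) = false := by
          simp only [beq_eq_false_iff_ne]; omega
        have heq := pvEqTrans _ _ _ (hF1 i (by omega)) (hF1 (i + 1) (by omega))
        simp only [hguard, heq, Bool.false_or, Bool.not_true]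
        simp
      rw [h1, List.nil_append]
      have h2 : ((fun i =>
          i == rest.length || !(PySem.Set.equal ((k :: rest).getD i PySem.Set.empty)
            ((k :: rest).getD (i + 1) PySem.Set.empty))) m) = true := by
        cases hc : R with
        | nil =>
          have hmr : m = rest.length := by
            rw [hc] at hRlen; simp at hRlen; omega
          simp [hmr]
        | cons x t =>
          have hx : (k :: rest).getD (m + 1) PySem.Set.empty = x := by
            have := hF3 0
            rw [hc] at this
            simpa using this
          have hfalse := pvEqFalse2 ((k :: rest).getD m PySem.Set.empty)
            ((k :: rest).getD (m + 1) PySem.Set.empty) k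
            (hF1 m (by omega)) (by rw [hx]; exact hF2 x t hc)
          simp only [hfalse, Bool.not_false, Bool.or_true]
      simp only [List.filter_cons, h2, if_true, List.filter_nil]
    rw [hpart1]
    -- part 2: the remaining indices shift
    rw [List.filter_map, List.filter_congr (q := fun j =>
        j == R.length - 1 || !(PySem.Set.equal (R.getD j PySem.Set.empty)
          (R.getD (j + 1) PySem.Set.empty))) ?_]
    · rw [show (List.range R.length).filter (fun j =>
          j == R.length - 1 || !(PySem.Set.equal (R.getD j PySem.Set.empty)
            (R.getD (j + 1) PySem.Set.empty))) = pvEnds R from rfl, ih]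
      simp only [List.map_map, List.map_cons, List.singleton_append]
      congr 1
      apply List.map_congr_left
      intro p _
      simp only [Function.comp]
      omega
    · intro j hj
      have hjR : j < R.length := List.mem_range.mp hj
      simp only [Function.comp]
      have hg : ((m + 1 + j) == rest.length) = (j == R.length - 1) := by
        by_cases h : j = R.length - 1
        · have h1 : m + 1 + j = rest.length := by omega
          rw [h1, h]
          simp
        · have l1 : ((m + 1 + j) == rest.length) = false := by
            simp only [beq_eq_false_iff_ne]; omega
          have l2 : (j == R.length - 1) = false := by
            simp only [beq_eq_false_iff_ne]; omega
          rw [l1, l2]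
      have e1 : (k :: rest).getD (m + 1 + j) PySem.Set.empty = R.getD j PySem.Set.empty := hF3 j
      have e2 : (k :: rest).getD (m + 1 + j + 1) PySem.Set.empty = R.getD (j + 1) PySem.Set.empty := by
        have h1 : m + 1 + j + 1 = m + 1 + (j + 1) := by omega
        rw [h1]; exact hF3 (j + 1)
      rw [hg, e1, e2]

-- ---- B side: the port's boundary/zip computation is pvIv's intervals ----
theorem pvAlt_eq (dnf_clauses : List (List String)) :
    tseitin_transformation_alt dnf_clauses
      = (pvIv ((dnf_clauses.map pvParseClause).map pvKeyOf)).flatMap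
          (pvEmitN (1 + PySem.List.maxD (((dnf_clauses.map pvParseClause).flatMap (fun x => x)).map (fun l => |l|)) (fun y => y) 0)
            (dnf_clauses.map pvParseClause)) := by
  simp only [tseitin_transformation_alt]
  generalize (dnf_clauses.map pvParseClause) = parsed
  generalize (1 + PySem.List.maxD ((parsed.flatMap (fun x => x)).map (fun l => |l|)) (fun y => y) 0) = base
  generalize hK : parsed.map pvKeyOf = K
  have hlen : K.length = parsed.length := by rw [← hK]; exact List.length_map pvKeyOf
  -- the starts list
  have hstarts : (PySem.List.pyRange 0 ((K.length : Nat) : Int) 1).filter (fun i =>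
      i == 0 || !(PySem.Set.equal ((PySem.List.pyGet? K i).getD PySem.Set.empty)
        ((PySem.List.pyGet? K (i - 1)).getD PySem.Set.empty)))
      = (pvStarts K).map (fun (i : Nat) => (i : Int)) := by
    rw [PySem.List.pyRange_zero_nat, List.filter_map]
    unfold pvStarts
    congr 1
    apply List.filter_congr
    intro i hi
    simp only [Function.comp]
    cases i with
    | zero =>
      have g1 : (((0 : Nat) : Int) == 0) = true := by rfl
      have g2 : ((0 : Nat) == 0) = true := by rfl
      rw [g1, g2, Bool.true_or, Bool.true_or]
    | succ j =>
      have g1 : (((j + 1 : Nat) : Int) == 0) = false := by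
        simp only [beq_eq_false_iff_ne]; omega
      have g2 : ((j + 1 : Nat) == 0) = false := by
        simp only [beq_eq_false_iff_ne]; omega
      have e2 : (((j + 1 : Nat) : Int) - 1) = ((j : Nat) : Int) := by push_cast; ring
      rw [g1, g2, e2, PySem.List.pyGet?_natCast, PySem.List.pyGet?_natCast,
        Bool.false_or, Bool.false_or, List.getD_eq_getElem?_getD, List.getD_eq_getElem?_getD,
        Nat.add_sub_cancel]
  -- the ends list
  have hends : (PySem.List.pyRange 0 ((K.length : Nat) : Int) 1).filter (fun i =>
      i == ((K.length : Nat) : Int) - 1 || !(PySem.Set.equal ((PySem.List.pyGet? K i).getD PySem.Set.empty)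
        ((PySem.List.pyGet? K (i + 1)).getD PySem.Set.empty)))
      = (pvEnds K).map (fun (i : Nat) => (i : Int)) := by
    rw [PySem.List.pyRange_zero_nat, List.filter_map]
    unfold pvEnds
    congr 1
    apply List.filter_congr
    intro i hi
    have hilt : i < K.length := List.mem_range.mp hi
    simp only [Function.comp]
    have hg : (((i : Nat) : Int) == ((K.length : Nat) : Int) - 1) = (i == K.length - 1) := by
      by_cases h : i = K.length - 1
      · have h1 : ((i : Nat) : Int) = ((K.length : Nat) : Int) - 1 := by omega
        rw [h1, h]
        simp
      · have l1 : (((i : Nat) : Int) == ((K.length : Nat) : Int) - 1) = false := by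
          simp only [beq_eq_false_iff_ne]; omega
        have l2 : ((i : Nat) == K.length - 1) = false := by
          simp only [beq_eq_false_iff_ne]; omega
        rw [l1, l2]
    have e3 : (((i : Nat) : Int) + 1) = (((i + 1 : Nat)) : Int) := by push_cast; ring
    rw [hg, e3, PySem.List.pyGet?_natCast, PySem.List.pyGet?_natCast,
      List.getD_eq_getElem?_getD, List.getD_eq_getElem?_getD]
  rw [hstarts, hends, pvStarts_eq, pvEnds_eq, List.map_map, List.map_map, List.zip_map',
    List.flatMap_map]
  apply List.flatMap_congr
  intro p hp
  obtain ⟨hle, hlt⟩ := pvIv_bounds K p hp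
  simp only [Function.comp]
  unfold pvEmitN
  have hrange : PySem.List.pyRange ((p.1 : Nat) : Int) (((p.2 : Nat) : Int) + 1) 1
      = ((List.range (p.2 + 1 - p.1)).map (fun j => p.1 + j)).map (fun (idx : Nat) => (idx : Int)) := by
    rw [PySem.List.pyRange_one]
    have ht : (((p.2 : Nat) : Int) + 1 - ((p.1 : Nat) : Int)).toNat = p.2 + 1 - p.1 := by omega
    rw [ht, List.map_map]
    apply List.map_congr_left
    intro j _
    simp only [Function.comp]
    push_cast
    ring
  rw [hrange, List.flatMap_map, List.map_map]
  congr 1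
  apply List.flatMap_congr
  intro idx hidx
  have hidxlt : idx < parsed.length := by
    obtain ⟨j, hj, rfl⟩ := List.mem_map.mp hidx
    have := List.mem_range.mp hj
    omega
  simp only [PySem.List.pyGet?_natCast, List.getD_eq_getElem?_getD]

-- ===== VERDICT (by name: the statement is the Claim_ definition above) =====
theorem tseitin_transformation_spec : Claim_equal_tseitin_transformation := by
  intro dnf _ hpre
  have hparse : ∀ c ∈ dnf, pvParseClause c ≠ [] := by
    intro c hc
    obtain ⟨hne, hsp, _⟩ := hpre c hc
    unfold pvParseClause
    rw [pvHeadGet c hne]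
    simpa using hsp
  show tseitin_transformation dnf = tseitin_transformation_alt dnf
  rw [pvAlt_eq]
  unfold tseitin_transformation
  rw [pvLoopA_eq_pvE, pvBase_eq dnf hparse, List.nil_append]
  have hfresh : ∀ l0 ∈ (dnf.map pvParseClause).head?,
      PySem.Set.equal (pvKeyOf l0) PySem.Set.empty = false := by
    intro l0 hl0
    cases hd : dnf with
    | nil => rw [hd] at hl0; simp at hl0
    | cons c rest =>
      rw [hd] at hl0; simp at hl0; subst hl0
      have hne := hparse c (by rw [hd]; simp)
      obtain ⟨a, t, hat⟩ := List.exists_cons_of_ne_nil hne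
      cases hq : PySem.Set.equal (pvKeyOf (pvParseClause c)) PySem.Set.empty with
      | false => rfl
      | true =>
        have hmem : |a| ∈ pvKeyOf (pvParseClause c) :=
          (PySem.Set.mem_ofList _ _).mpr (by rw [hat]; simp)
        have := ((PySem.Set.equal_iff _ _).mp hq |a|).mp hmem
        simp [PySem.Set.empty] at this
  have h0 := pvE_iv (1 + PySem.List.maxD (((dnf.map pvParseClause).flatMap (fun x => x)).map (fun l => |l|)) (fun y => y) 0)
    (dnf.map pvParseClause) (dnf.map pvParseClause).length (dnf.map pvParseClause) 0
    PySem.Set.empty le_rfl (by simp) hfresh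
  simpa using h0
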